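-- pv_equiv track=rewrite | github.com/litansh/TrendMaster-AI | adaptive_istio_rate_limit/scripts/core/prime_time_detector.py | _group_consecutive_hours
-- ===== SOURCE A (Python) =====
-- from typing import Dict, List, Tuple, Optional
--
-- def _group_consecutive_hours(hours: List[int]) -> List[Dict]:
--     """
--     Group consecutive hours into periods
--     """
--     if not hours:
--         return []
--
--     hours = sorted(hours)
--     periods = []
--     current_start = hours[0]
--     current_end = hours[0]
--
--     for i in range(1, len(hours)):
--         if hours[i] == current_end + 1:
--             # Consecutive hour
--             current_end = hours[i]
--         else:
--             # Gap found, save current period and start new one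
--             periods.append({
--                 'start_hour': current_start,
--                 'end_hour': current_end,
--                 'duration': current_end - current_start + 1
--             })
--             current_start = hours[i]
--             current_end = hours[i]
--
--     # Add the last period
--     periods.append({
--         'start_hour': current_start,
--         'end_hour': current_end,
--         'duration': current_end - current_start + 1
--     })
--
--     return periods
-- ===== SOURCE B (Python) =====
-- from itertools import groupby
-- from typing import Dict, List
--
--
-- def _group_consecutive_hours(hours: List[int]) -> List[Dict]:
--     """
--     Group consecutive hours into periods (groupby over enumerate(sorted),
--     key = value - index: each constant-key run is a maximal consecutive block;
--     a duplicate value lowers the key and so starts a new block, as in A).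
--     """
--     periods = []
--     for _, grp in groupby(enumerate(sorted(hours)), key=lambda p: p[1] - p[0]):
--         vals = [v for _, v in grp]
--         periods.append({
--             'start_hour': vals[0],
--             'end_hour': vals[-1],
--             'duration': vals[-1] - vals[0] + 1
--         })
--     return periods
-- ===== Notes on version B (the rewrite author's own statement) =====
-- stated objective: idiomatic
-- what changed: Replaces the explicit current_start/current_end accumulator loop with itertools.groupby over enumerate(sorted(hours)) keyed by value-index, whose constant-key runs are exactly the maximal consecutive blocks (duplicates drop the key and start a new block, as in A).
import Mathlib
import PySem

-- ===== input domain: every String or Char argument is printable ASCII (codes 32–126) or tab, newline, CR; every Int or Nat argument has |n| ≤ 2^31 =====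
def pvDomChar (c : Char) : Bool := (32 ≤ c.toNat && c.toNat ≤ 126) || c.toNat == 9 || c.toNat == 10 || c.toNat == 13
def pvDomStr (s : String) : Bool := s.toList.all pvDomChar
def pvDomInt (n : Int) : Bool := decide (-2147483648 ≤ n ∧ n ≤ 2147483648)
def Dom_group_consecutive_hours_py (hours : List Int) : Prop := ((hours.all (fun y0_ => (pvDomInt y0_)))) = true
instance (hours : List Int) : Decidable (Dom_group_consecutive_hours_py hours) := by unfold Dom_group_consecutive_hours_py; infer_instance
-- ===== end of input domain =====

-- ===== PORT A =====
-- B is the idiomatic rewrite: itertools.groupby over enumerate(sorted) keyed by value-index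
-- replaces A's explicit current_start/current_end accumulator loop; same return values.
-- the dict literal both programs build
def pvMkPeriod (cs ce : Int) : List (String × Int) :=
  [("start_hour", cs), ("end_hour", ce), ("duration", ce - cs + 1)]

def group_consecutive_hours_py (hours : List Int) : List (List (String × Int)) :=
  if hours = [] then []
  else
    let hs := PySem.List.sorted hours (fun x => x) false
    let h0 := PySem.List.pyGetD hs 0 0
    let st := (PySem.List.pyRange 1 (hs.length : Int) 1).foldl
      (fun st i =>
        if PySem.List.pyGetD hs i 0 = st.2.2 + 1 then (st.1, st.2.1, PySem.List.pyGetD hs i 0)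
        else (st.1 ++ [pvMkPeriod st.2.1 st.2.2], PySem.List.pyGetD hs i 0, PySem.List.pyGetD hs i 0))
      (([] : List (List (String × Int))), h0, h0)
    st.1 ++ [pvMkPeriod st.2.1 st.2.2]

-- ===== PORT B =====
-- itertools.groupby, key = p[1] - p[0]: split the enumerated list into maximal
-- runs of adjacent pairs with equal key (hand-ported; exact for this use)
def pvKey (p : Int × Int) : Int := p.2 - p.1

def pvRunsAux (x : Int × Int) : List (Int × Int) → List (Int × Int) × List (List (Int × Int))
  | [] => ([x], [])
  | y :: ys =>
    let p := pvRunsAux y ys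
    if pvKey x = pvKey y then (x :: p.1, p.2) else ([x], p.1 :: p.2)

def pvRuns : List (Int × Int) → List (List (Int × Int))
  | [] => []
  | x :: xs => let p := pvRunsAux x xs; p.1 :: p.2

def group_consecutive_hours_py_alt (hours : List Int) : List (List (String × Int)) :=
  (pvRuns (PySem.List.enumerate (PySem.List.sorted hours (fun x => x) false) 0)).map
    (fun g =>
      let vals := g.map Prod.snd
      pvMkPeriod (PySem.List.pyGetD vals 0 0) (PySem.List.pyGetD vals (-1) 0))

-- ===== PRECONDITION & SPEC =====
def Spec_group_consecutive_hours_py (hours : List Int) (out : List (List (String × Int))) : Prop := out = group_consecutive_hours_py_alt hours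
instance (hours : List Int) (out : List (List (String × Int))) : Decidable (Spec_group_consecutive_hours_py hours out) := by unfold Spec_group_consecutive_hours_py; infer_instance

-- ===== CLAIM (what is proved, stated in full; the proofs are below) =====
def Claim_equal_group_consecutive_hours_py : Prop := ∀ (hours : List Int), Dom_group_consecutive_hours_py hours → Spec_group_consecutive_hours_py hours (group_consecutive_hours_py hours)

-- ===== LEMMAS AND PROOFS =====

-- A's loop, as structural recursion over the tail of the sorted list
def pvAgo (cs ce : Int) : List Int → List (List (String × Int))
  | [] => [pvMkPeriod cs ce]
  | x :: xs => if x = ce + 1 then pvAgo cs x xs else pvMkPeriod cs ce :: pvAgo x x xs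

-- B's per-group dict, in headI/getLastI form
def pvOut (g : List (Int × Int)) : List (String × Int) :=
  pvMkPeriod ((g.map Prod.snd).headI) ((g.map Prod.snd).getLastI)

lemma pvGetLastI_cons {α : Type} [Inhabited α] (a : α) (l : List α) (h : l ≠ []) :
    (a :: l).getLastI = l.getLastI := by
  cases l with
  | nil => exact absurd rfl h
  | cons b m => simp [List.getLastI_eq_getLast?_getD, List.getLast?_cons_cons]

lemma pvRunsAux_head (x : Int × Int) (ys : List (Int × Int)) :
    ∃ r, (pvRunsAux x ys).1 = x :: r := by
  cases ys with
  | nil => exact ⟨[], rfl⟩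
  | cons y ys => simp only [pvRunsAux]; split <;> exact ⟨_, rfl⟩

lemma pvFoldl_eq_ago (t : List Int) : ∀ (ps : List (List (String × Int))) (cs ce : Int),
    (let st := t.foldl
      (fun st x =>
        if x = st.2.2 + 1 then (st.1, st.2.1, x)
        else (st.1 ++ [pvMkPeriod st.2.1 st.2.2], x, x)) (ps, cs, ce)
     st.1 ++ [pvMkPeriod st.2.1 st.2.2]) = ps ++ pvAgo cs ce t := by
  induction t with
  | nil => intro ps cs ce; simp [pvAgo]
  | cons x xs ih =>
    intro ps cs ce
    simp only [List.foldl_cons, pvAgo]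
    by_cases h : x = ce + 1
    · subst h
      simpa using ih ps cs (ce + 1)
    · simp only [if_neg h]
      rw [ih (ps ++ [pvMkPeriod cs ce]) x x]
      simp

lemma pvRuns_main (t : List Int) : ∀ (i cs ce : Int),
    pvMkPeriod cs (((pvRunsAux (i, ce) (PySem.List.enumerate t (i+1))).1.map Prod.snd).getLastI)
      :: ((pvRunsAux (i, ce) (PySem.List.enumerate t (i+1))).2.map pvOut)
    = pvAgo cs ce t := by
  induction t with
  | nil =>
    intro i cs ce
    simp only [PySem.List.enumerate_nil, pvRunsAux, pvAgo, List.map_cons, List.map_nil]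
    rfl
  | cons x xs ih =>
    intro i cs ce
    rw [PySem.List.enumerate_cons]
    simp only [pvRunsAux, pvAgo]
    have hkey : (pvKey (i, ce) = pvKey (i + 1, x)) ↔ (x = ce + 1) := by
      simp only [pvKey]; constructor <;> intro h <;> omega
    obtain ⟨r, hr⟩ := pvRunsAux_head (i + 1, x) (PySem.List.enumerate xs (i + 1 + 1))
    by_cases h : x = ce + 1
    · rw [if_pos (hkey.mpr h)]
      have hne : ((pvRunsAux (i + 1, x) (PySem.List.enumerate xs (i + 1 + 1))).1.map Prod.snd) ≠ [] := by
        rw [hr]; simp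
      simp only [List.map_cons]
      rw [pvGetLastI_cons ce _ hne, ih (i + 1) cs x, h, if_pos rfl]
    · rw [if_neg (fun hk => h (hkey.mp hk))]
      rw [if_neg h]
      have := ih (i + 1) x x
      rw [← this]
      simp only [pvOut, hr, List.map_cons, List.headI_cons]
      rfl

lemma pvRunsAux_snd_ne_nil (ys : List (Int × Int)) : ∀ (x : Int × Int),
    ∀ g ∈ (pvRunsAux x ys).2, g ≠ [] := by
  induction ys with
  | nil => intro x g hg; simp [pvRunsAux] at hg
  | cons y ys ih =>
    intro x g hg
    simp only [pvRunsAux] at hg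
    split at hg
    · exact ih y g hg
    · simp only [List.mem_cons] at hg
      rcases hg with hg | hg
      · obtain ⟨r, hr⟩ := pvRunsAux_head y ys
        rw [hg, hr]; simp
      · exact ih y g hg

lemma pvOut_eq (g : List (Int × Int)) (hg : g ≠ []) :
    pvMkPeriod (PySem.List.pyGetD (g.map Prod.snd) 0 0) (PySem.List.pyGetD (g.map Prod.snd) (-1) 0)
      = pvOut g := by
  have hm : g.map Prod.snd ≠ [] := by simpa using hg
  rw [pvOut, PySem.List.pyGetD_neg_one _ _ hm, PySem.List.pyGetD_zero]
  have h1 : (g.map Prod.snd).getD 0 0 = (g.map Prod.snd).headI := by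
    cases g with
    | nil => exact absurd rfl hg
    | cons a l => simp
  have h2 : (g.map Prod.snd).getLast hm = (g.map Prod.snd).getLastI := by
    rw [List.getLastI_eq_getLast?_getD, List.getLast?_eq_some_getLast hm, Option.getD_some]
  rw [h1, h2]

theorem group_consecutive_hours_py_spec : Claim_equal_group_consecutive_hours_py := by
  intro hours _
  unfold Spec_group_consecutive_hours_py group_consecutive_hours_py group_consecutive_hours_py_alt
  by_cases h : hours = []
  · subst h
    rw [if_pos rfl]
    have : PySem.List.sorted ([] : List Int) (fun x => x) false = [] := by
      rw [PySem.List.sorted_eq_nil_iff]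
    rw [this, PySem.List.enumerate_nil]
    rfl
  · rw [if_neg h]
    have hs_ne : PySem.List.sorted hours (fun x => x) false ≠ [] := by
      rw [Ne, PySem.List.sorted_eq_nil_iff]; exact h
    cases hhs : PySem.List.sorted hours (fun x => x) false with
    | nil => exact absurd hhs hs_ne
    | cons hd t =>
      dsimp only
      -- A side
      rw [PySem.List.foldl_pyRange_pyGetD' (hd :: t) 0
        (fun st x => if x = st.2.2 + 1 then (st.1, st.2.1, x)
          else (st.1 ++ [pvMkPeriod st.2.1 st.2.2], x, x))
        (([] : List (List (String × Int))), PySem.List.pyGetD (hd :: t) 0 0, PySem.List.pyGetD (hd :: t) 0 0)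
        (by norm_num : (0:Int) ≤ 1)]
      simp only [PySem.List.pyGetD_zero_cons, Int.toNat_one, List.drop_succ_cons, List.drop_zero]
      rw [pvFoldl_eq_ago t [] hd hd]
      -- B side
      rw [PySem.List.enumerate_cons]
      simp only [pvRuns]
      obtain ⟨r, hr⟩ := pvRunsAux_head (0, hd) (PySem.List.enumerate t (0 + 1))
      rw [List.map_cons]
      rw [pvOut_eq _ (by rw [hr]; simp),
          List.map_congr_left (fun g hg => pvOut_eq g (pvRunsAux_snd_ne_nil _ _ g hg))]
      have hout : pvOut (pvRunsAux (0, hd) (PySem.List.enumerate t (0 + 1))).1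
          = pvMkPeriod hd (((pvRunsAux (0, hd) (PySem.List.enumerate t (0 + 1))).1.map Prod.snd).getLastI) := by
        have hhead : ((pvRunsAux (0, hd) (PySem.List.enumerate t (0 + 1))).1.map Prod.snd).headI = hd := by
          rw [hr]; rfl
        rw [pvOut, hhead]
      rw [hout, pvRuns_main t 0 hd hd]
      simp
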